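-- pv_equiv track=rewrite | github.com/yashPedireddi/Molecular-Energy-Prediction-GNN | DatasetCreation5.py | _should_reverse
-- ===== SOURCE A (Python) =====
-- from typing import Any
--
-- def _should_reverse(arr: list[Any]) -> bool:
--
--     middle = len(arr) // 2
--
--     for left, right in zip(arr[:middle], reversed(arr[middle:])):
--
--         if left == right:
--             continue
--         elif left < right:
--             return True
--         else:
--             return False
--
--     return False
-- ===== SOURCE B (Python) =====
-- def _should_reverse(arr):
--     return arr < arr[::-1]
-- ===== Notes on version B (the rewrite author's own statement) =====
-- stated objective: simpler
-- what changed: Replaced the explicit outside-in index loop over zip(arr[:middle], reversed(arr[middle:])) with a single lexicographic comparison of the list against its reverse (arr < arr[::-1]), proved equal via a symmetry argument about the tail pairs.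
import Mathlib
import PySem

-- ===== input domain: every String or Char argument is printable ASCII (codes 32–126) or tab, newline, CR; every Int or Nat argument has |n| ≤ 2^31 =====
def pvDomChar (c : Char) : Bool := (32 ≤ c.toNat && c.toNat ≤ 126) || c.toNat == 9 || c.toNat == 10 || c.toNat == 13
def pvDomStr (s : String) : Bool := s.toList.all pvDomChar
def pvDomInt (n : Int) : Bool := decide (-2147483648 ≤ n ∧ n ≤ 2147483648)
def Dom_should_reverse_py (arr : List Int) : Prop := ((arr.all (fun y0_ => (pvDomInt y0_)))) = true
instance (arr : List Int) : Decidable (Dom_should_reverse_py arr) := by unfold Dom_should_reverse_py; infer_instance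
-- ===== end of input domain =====

-- B replaces A's explicit outside-in loop by one lexicographic comparison of the list with its reverse (objective: simpler).

-- ===== PORT A =====
-- the for-loop over zip(arr[:middle], reversed(arr[middle:])) with its early returns
def pvLoopA : List (Int × Int) → Bool
  | [] => false
  | (l, r) :: t => if l == r then pvLoopA t else if l < r then true else false

def should_reverse_py (arr : List Int) : Bool :=
  let middle := arr.length / 2
  pvLoopA ((arr.take middle).zip (arr.drop middle).reverse)

-- ===== PORT B =====
-- arr < arr[::-1] : Python's lexicographic list comparison = List.Lex (· < ·) (the lists have equal length)
def should_reverse_py_alt (arr : List Int) : Bool := decide (arr < arr.reverse)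

-- ===== PRECONDITION & SPEC =====
def Spec_should_reverse_py (arr : List Int) (out : Bool) : Prop := out = should_reverse_py_alt arr
instance (arr : List Int) (out : Bool) : Decidable (Spec_should_reverse_py arr out) := by unfold Spec_should_reverse_py; infer_instance

-- ===== CLAIM (what is proved, stated in full; the proofs are below) =====
def Claim_equal_should_reverse_py : Prop := ∀ (arr : List Int), Dom_should_reverse_py arr → Spec_should_reverse_py arr (should_reverse_py arr)

-- ===== LEMMAS AND PROOFS =====

-- getElem depends only on the index value
theorem pvGetIdx (l : List Int) (i j : Nat) (hi : i < l.length) (hj : j < l.length)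
    (h : i = j) : l[i]'hi = l[j]'hj := by subst h; rfl

-- lexicographic < on equal-length lists is exactly A's first-unequal-pair loop over the zip
theorem pvLex_eq_loop (a b : List Int) (h : a.length = b.length) :
    decide (a < b) = pvLoopA (a.zip b) := by
  induction a generalizing b with
  | nil =>
    cases b with
    | nil => decide
    | cons y ys => simp at h
  | cons x xs ih =>
    cases b with
    | nil => simp at h
    | cons y ys =>
      simp only [List.length_cons, Nat.add_right_cancel_iff] at h
      rcases lt_trichotomy x y with hlt | heq | hgt
      · have hlex : (x :: xs : List Int) < y :: ys := List.Lex.rel hlt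
        simp [List.zip, pvLoopA, ne_of_lt hlt, hlt, hlex]
      · subst heq
        have hiff : ((x :: xs : List Int) < x :: ys) ↔ xs < ys := by
          constructor
          · intro hl; cases hl with
            | cons h' => exact h'
            | rel h' => exact absurd h' (lt_irrefl x)
          · intro h'; exact List.Lex.cons h'
        simp only [List.zip, List.zipWith_cons_cons, pvLoopA, beq_self_eq_true, if_true]
        rw [decide_eq_decide.mpr hiff]
        exact ih ys h
      · have hne : x ≠ y := ne_of_gt hgt
        have hnl : ¬ ((x :: xs : List Int) < y :: ys) := by
          intro hl; cases hl with
          | cons h' => exact hne rfl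
          | rel h' => exact absurd h' (not_lt_of_gt hgt)
        simp [List.zip, pvLoopA, hne, not_lt_of_gt hgt, hnl]

theorem pvLoopA_append (u v : List (Int × Int)) :
    pvLoopA (u ++ v) = if u.all (fun p => p.1 == p.2) then pvLoopA v else pvLoopA u := by
  induction u with
  | nil => simp
  | cons p t ih =>
    obtain ⟨l, r⟩ := p
    by_cases h : l = r
    · subst h
      have hall : ((l, l) :: t).all (fun p => p.1 == p.2) = t.all (fun p => p.1 == p.2) := by
        simp
      rw [hall]
      simp [pvLoopA, ih]
    · simp [pvLoopA, h]

theorem pvLoopA_all_eq (z : List (Int × Int)) (h : ∀ p ∈ z, p.1 = p.2) :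
    pvLoopA z = false := by
  induction z with
  | nil => rfl
  | cons p t ih =>
    obtain ⟨l, r⟩ := p
    have hlr : l = r := h (l, r) List.mem_cons_self
    subst hlr
    simp only [pvLoopA, beq_self_eq_true, if_true]
    exact ih (fun q hq => h q (List.mem_cons_of_mem _ hq))

-- A's zip of the two halves is the first half of the zip of arr with its reverse
theorem pvPairs_eq (arr : List Int) :
    (arr.take (arr.length / 2)).zip (arr.drop (arr.length / 2)).reverse
      = (arr.zip arr.reverse).take (arr.length / 2) := by
  have hm : arr.length / 2 ≤ arr.length := Nat.div_le_self _ 2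
  apply List.ext_getElem
  · simp; omega
  · intro i h1 h2
    have hi : i < arr.length / 2 := by
      simp only [List.length_zip, List.length_take, List.length_reverse, List.length_drop] at h1
      omega
    simp only [List.getElem_zip, List.getElem_take, List.getElem_reverse, List.getElem_drop,
      List.length_drop]
    congr 1
    exact pvGetIdx _ _ _ _ _ (by omega)

-- the tail pairs of arr.zip arr.reverse are forced equal once the first half's pairs are
theorem pvDrop_all_eq (arr : List Int)
    (h : ∀ p ∈ (arr.zip arr.reverse).take (arr.length / 2), p.1 = p.2) :
    ∀ p ∈ (arr.zip arr.reverse).drop (arr.length / 2), p.1 = p.2 := by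
  intro p hp
  rw [List.mem_iff_getElem] at hp
  obtain ⟨i, hi, hpe⟩ := hp
  simp only [List.length_drop, List.length_zip, List.length_reverse, Nat.min_self] at hi
  have hk : arr.length / 2 + i < arr.length := by omega
  have hz : p = (arr[arr.length / 2 + i]'hk,
      arr[arr.length - 1 - (arr.length / 2 + i)]'(by omega)) := by
    rw [← hpe]
    simp only [List.getElem_drop, List.getElem_zip, List.getElem_reverse]
  rw [hz]
  simp only
  by_cases hc : arr.length - 1 - (arr.length / 2 + i) < arr.length / 2
  · -- the mirrored index lies in the first half: use h there
    have hlen : arr.length - 1 - (arr.length / 2 + i)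
        < ((arr.zip arr.reverse).take (arr.length / 2)).length := by
      simp only [List.length_take, List.length_zip, List.length_reverse]; omega
    have h1 := h _ (List.getElem_mem hlen)
    simp only [List.getElem_take, List.getElem_zip, List.getElem_reverse] at h1
    calc arr[arr.length / 2 + i]'hk
        = arr[arr.length - 1 - (arr.length - 1 - (arr.length / 2 + i))]'(by omega) :=
          pvGetIdx _ _ _ _ _ (by omega)
      _ = arr[arr.length - 1 - (arr.length / 2 + i)]'(by omega) := h1.symm
  · -- only possible at the odd middle: the pair is (arr[mid], arr[mid])
    exact pvGetIdx _ _ _ _ _ (by omega)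

-- ===== VERDICT (by name: the statement is the Claim_ definition above) =====
theorem should_reverse_py_spec : Claim_equal_should_reverse_py := by
  intro arr _
  unfold Spec_should_reverse_py should_reverse_py_alt
  show pvLoopA ((arr.take (arr.length / 2)).zip (arr.drop (arr.length / 2)).reverse)
      = decide (arr < arr.reverse)
  rw [pvPairs_eq, pvLex_eq_loop arr arr.reverse (by simp)]
  have hsplit : pvLoopA (arr.zip arr.reverse)
      = pvLoopA ((arr.zip arr.reverse).take (arr.length / 2)
          ++ (arr.zip arr.reverse).drop (arr.length / 2)) := by
    rw [List.take_append_drop]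
  rw [hsplit, pvLoopA_append]
  split
  · next hall =>
    rw [List.all_eq_true] at hall
    rw [pvLoopA_all_eq _ (pvDrop_all_eq arr (fun p hp => by simpa using hall p hp)),
      pvLoopA_all_eq _ (fun p hp => by simpa using hall p hp)]
  · rfl
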